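-- pv_equiv track=rewrite | github.com/glee1228/TIL | PostechAI/ML/test1.py | computeMaxWordLength1
-- ===== SOURCE A (Python) =====
-- def computeMaxWordLength1(text):
--     """
--     Given a string |text|, return the longest word in |text|.  If there are
--     ties, choose the word that comes latest in the alphabet.
--     A word is defined by a maximal sequence of characters without whitespaces.
--     You might find max() and list comprehensions handy here.
--     """
--     # BEGIN_YOUR_CODE
--     words = text.split()
--     max_word = words[0]
--     for word in words:
--         if len(word)>len(max_word):
--             max_word = word
--         elif word > max_word and len(word)==len(max_word):
--             max_word = word
--     return max_word
-- ===== SOURCE B (Python) =====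
-- def computeMaxWordLength1(text):
--     return sorted(text.split(), key=lambda w: (len(w), w))[-1]
-- ===== Notes on version B (the rewrite author's own statement) =====
-- stated objective: simpler
-- what changed: Replaces the manual best-so-far scan with sorting all words by the key (len, word) and taking the last element of the sorted list.
import Mathlib
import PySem

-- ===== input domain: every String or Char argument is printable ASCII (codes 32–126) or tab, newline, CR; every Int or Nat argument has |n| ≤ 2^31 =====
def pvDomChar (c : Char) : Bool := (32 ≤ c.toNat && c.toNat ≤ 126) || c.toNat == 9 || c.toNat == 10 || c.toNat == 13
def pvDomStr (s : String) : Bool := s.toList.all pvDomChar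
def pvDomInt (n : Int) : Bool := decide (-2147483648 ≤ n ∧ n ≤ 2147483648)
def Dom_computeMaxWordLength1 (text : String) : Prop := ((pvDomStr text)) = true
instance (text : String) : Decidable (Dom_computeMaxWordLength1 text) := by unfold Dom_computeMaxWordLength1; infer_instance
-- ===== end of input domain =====

-- B replaces A's manual best-so-far scan with sorting the words by the key (len, word) and taking the last element (objective: simpler).


-- ===== PORT A =====
-- words = text.split(); max_word = words[0]; loop updating max_word; return max_word
def computeMaxWordLength1 (text : String) : String :=
  match PySem.Str.split₀ text with
  | [] => ""            -- words[0] raises IndexError here; excluded by Pre_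
  | w :: ws =>
    (w :: ws).foldl (fun max_word word =>
      if PySem.Str.len word > PySem.Str.len max_word then word
      else if max_word < word ∧ PySem.Str.len word = PySem.Str.len max_word then word
      else max_word) w

-- ===== PORT B =====
-- return sorted(text.split(), key=lambda w: (len(w), w))[-1]
def computeMaxWordLength1_alt (text : String) : String :=
  (PySem.List.pyGet?
      (PySem.List.sorted2 (PySem.Str.split₀ text) (fun w => PySem.Str.len w) (fun w => w))
      (-1)).getD ""     -- [-1] raises IndexError on the empty list; excluded by Pre_

-- ===== PRECONDITION & SPEC =====
-- Pre_ excludes exactly the inputs with no words (empty/all-whitespace text), where both Pythons raise IndexError.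
def Pre_computeMaxWordLength1 (text : String) : Prop := PySem.Str.split₀ text ≠ []
instance (text : String) : Decidable (Pre_computeMaxWordLength1 text) := by unfold Pre_computeMaxWordLength1; infer_instance
def pvWitness_computeMaxWordLength1 : String := "a bc"

def Spec_computeMaxWordLength1 (text : String) (out : String) : Prop := out = computeMaxWordLength1_alt text
instance (text : String) (out : String) : Decidable (Spec_computeMaxWordLength1 text out) := by unfold Spec_computeMaxWordLength1; infer_instance

-- ===== CLAIM (what is proved, stated in full; the proofs are below) =====
def Claim_equal_computeMaxWordLength1 : Prop := ∀ (text : String), Dom_computeMaxWordLength1 text → Pre_computeMaxWordLength1 text → Spec_computeMaxWordLength1 text (computeMaxWordLength1 text)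

-- ===== LEMMAS AND PROOFS =====

-- the compound key (len, word), into the lexicographic product order (proof-side only)
def pvKey (w : String) : Lex (Nat × String) := toLex (w.length, w)

def pvBefore (a b : String) : Bool := decide (pvKey a < pvKey b)

theorem pvKey_inj {a b : String} (h : pvKey a = pvKey b) : a = b := by
  have := congrArg (fun p => (ofLex p).2) h
  simpa [pvKey] using this

theorem pvKey_lt_iff (a b : String) :
    pvKey a < pvKey b ↔ a.length < b.length ∨ (a.length = b.length ∧ a < b) := by
  simp [pvKey, Prod.Lex.toLex_lt_toLex]

theorem pvLen_lt_iff (s t : String) :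
    PySem.Str.len s < PySem.Str.len t ↔ s.length < t.length := by
  simp [PySem.Str.len]

theorem pvLen_eq_iff (s t : String) :
    PySem.Str.len s = PySem.Str.len t ↔ s.length = t.length := by
  simp [PySem.Str.len]

-- sorted2's comparison with keys (Str.len, id) is pvBefore
theorem pvBefore_eq (a b : String) :
    (decide (PySem.Str.len a < PySem.Str.len b) ||
      (!decide (PySem.Str.len b < PySem.Str.len a) && decide (a < b))) = pvBefore a b := by
  simp only [pvBefore, pvKey_lt_iff, pvLen_lt_iff]
  rcases lt_trichotomy a.length b.length with h | h | h
  · simp [h, Nat.lt_asymm h]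
  · simp [h]
  · simp [h, Nat.lt_asymm h, Nat.ne_of_gt h]

theorem pvGetLast?_cons_ne {α : Type} (y : α) (l : List α) (h : l ≠ []) :
    (y :: l).getLast? = l.getLast? := by
  cases l with
  | nil => exact absurd rfl h
  | cons z zs => rw [List.getLast?_cons_cons]

theorem pvInsert_ne_nil (x : String) (ys : List String) :
    PySem.List.insertBy pvBefore x ys ≠ [] := by
  intro hnil
  have : x ∈ PySem.List.insertBy pvBefore x ys :=
    (PySem.List.mem_insertBy pvBefore x x ys).2 (Or.inl rfl)
  simp [hnil] at this

-- insertBy pvBefore preserves key-ascending order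
theorem pvInsert_pairwise (x : String) (ys : List String)
    (h : ys.Pairwise (fun a b => pvKey a ≤ pvKey b)) :
    (PySem.List.insertBy pvBefore x ys).Pairwise (fun a b => pvKey a ≤ pvKey b) := by
  induction ys with
  | nil => simp [PySem.List.insertBy]
  | cons y ys ih =>
    rcases List.pairwise_cons.1 h with ⟨hy, hys⟩
    by_cases hb : pvBefore x y = true
    · simp only [PySem.List.insertBy, hb, if_true]
      refine List.pairwise_cons.2 ⟨?_, h⟩
      intro z hz
      have hxy : pvKey x < pvKey y := by simpa [pvBefore] using hb
      rcases hz with _ | hz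
      · exact le_of_lt hxy
      · exact le_trans (le_of_lt hxy) (hy _ (by assumption))
    · simp only [PySem.List.insertBy, hb, Bool.false_eq_true, if_false]
      refine List.pairwise_cons.2 ⟨?_, ih hys⟩
      intro z hz
      rcases (PySem.List.mem_insertBy pvBefore x z ys).1 hz with hzx | hz
      · rw [hzx]
        exact le_of_not_gt (by simpa [pvBefore] using hb)
      · exact hy _ hz

-- last of an ordered insert: the pvKey-larger of x and the old last
theorem pvInsert_getLast? (x : String) (ys : List String)
    (h : ys.Pairwise (fun a b => pvKey a ≤ pvKey b)) :
    (PySem.List.insertBy pvBefore x ys).getLast? =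
      some (match ys.getLast? with
            | none => x
            | some m => if pvKey m < pvKey x then x else m) := by
  induction ys with
  | nil => simp [PySem.List.insertBy]
  | cons y ys ih =>
    rcases List.pairwise_cons.1 h with ⟨hy, hys⟩
    by_cases hb : pvBefore x y = true
    · have hxy : pvKey x < pvKey y := by simpa [pvBefore] using hb
      simp only [PySem.List.insertBy, hb, if_true]
      cases ys with
      | nil =>
        simp [List.getLast?]
        exact fun hlt => absurd hlt (lt_asymm hxy)
      | cons z zs =>
        obtain ⟨m, hm⟩ : ∃ m, (z :: zs).getLast? = some m := by
          cases hzz : (z :: zs).getLast? with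
          | none => exact absurd (List.getLast?_eq_none_iff.1 hzz) (by simp)
          | some m => exact ⟨m, rfl⟩
        have hmem : m ∈ z :: zs := List.mem_of_getLast? hm
        have hxl : pvKey x < pvKey m := lt_of_lt_of_le hxy (hy _ hmem)
        simp only [List.getLast?_cons_cons, hm]
        simp [lt_asymm hxl]
    · simp only [PySem.List.insertBy, hb, Bool.false_eq_true, if_false]
      have hnx : ¬ pvKey x < pvKey y := by simpa [pvBefore] using hb
      cases ys with
      | nil =>
        rcases lt_trichotomy (pvKey y) (pvKey x) with h1 | h1 | h1
        · simp [PySem.List.insertBy, List.getLast?, h1]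
        · have : y = x := pvKey_inj h1
          simp [PySem.List.insertBy, List.getLast?, this]
        · exact absurd h1 hnx
      | cons z zs =>
        rw [pvGetLast?_cons_ne y _ (pvInsert_ne_nil x (z :: zs)), ih hys,
          List.getLast?_cons_cons]

-- folding inserts from a sorted nonempty accumulator: the last element is the running lex-max
theorem pvFold_getLast? (ws : List String) :
    ∀ (acc : List String) (m : String),
      acc.Pairwise (fun a b => pvKey a ≤ pvKey b) → acc.getLast? = some m →
      (ws.foldl (fun acc x => PySem.List.insertBy pvBefore x acc) acc).getLast? =
        some (ws.foldl (fun m w => if pvKey m < pvKey w then w else m) m) := by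
  induction ws with
  | nil => intro acc m _ hl; simpa using hl
  | cons w ws ih =>
    intro acc m hp hl
    have hp' := pvInsert_pairwise w acc hp
    have hl' := pvInsert_getLast? w acc hp
    rw [hl] at hl'
    exact ih _ _ hp' hl'

-- A's update step is exactly "keep the pvKey-larger word"
theorem pvStepA (max_word word : String) :
    (if PySem.Str.len word > PySem.Str.len max_word then word
     else if max_word < word ∧ PySem.Str.len word = PySem.Str.len max_word then word
     else max_word) = (if pvKey max_word < pvKey word then word else max_word) := by
  split_ifs with h1 h2 h3 h4 h5
  · rfl
  · exact absurd ((pvKey_lt_iff _ _).2 (Or.inl ((pvLen_lt_iff _ _).1 h1))) h2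
  · rfl
  · exact absurd ((pvKey_lt_iff _ _).2 (Or.inr ⟨((pvLen_eq_iff _ _).1 h3.2).symm, h3.1⟩)) h4
  · rcases (pvKey_lt_iff _ _).1 h5 with h | ⟨hl, hlt⟩
    · exact absurd ((pvLen_lt_iff _ _).2 h) h1
    · exact absurd ⟨hlt, (pvLen_eq_iff _ _).2 hl.symm⟩ h3
  · rfl

-- the whole computation on the (nonempty) word list
theorem pvMain (w : String) (ws : List String) :
    (w :: ws).foldl (fun max_word word =>
        if PySem.Str.len word > PySem.Str.len max_word then word
        else if max_word < word ∧ PySem.Str.len word = PySem.Str.len max_word then word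
        else max_word) w =
      ((PySem.List.pyGet?
          (PySem.List.sorted2 (w :: ws) (fun w => PySem.Str.len w) (fun w => w))
          (-1)).getD "") := by
  have hfun : (fun (a b : String) =>
      (decide (PySem.Str.len a < PySem.Str.len b) ||
        (!decide (PySem.Str.len b < PySem.Str.len a) && decide (a < b)))) = pvBefore := by
    funext a b; exact pvBefore_eq a b
  have hb : PySem.List.sorted2 (w :: ws) (fun w => PySem.Str.len w) (fun w => w) =
      (w :: ws).foldl (fun acc x => PySem.List.insertBy pvBefore x acc) [] := by
    rw [← hfun]; rfl
  rw [PySem.List.pyGet?_neg_one, hb]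
  have hone : PySem.List.insertBy pvBefore w ([] : List String) = [w] := by
    simp [PySem.List.insertBy]
  simp only [List.foldl_cons]
  rw [hone, pvFold_getLast? ws [w] w (by simp) (by simp)]
  have hself : (if PySem.Str.len w > PySem.Str.len w then w
      else if w < w ∧ True then w else w) = w := by simp
  have hstep : (fun (max_word word : String) =>
      if PySem.Str.len word > PySem.Str.len max_word then word
      else if max_word < word ∧ PySem.Str.len word = PySem.Str.len max_word then word
      else max_word) = (fun m w => if pvKey m < pvKey w then w else m) := by
    funext m v; exact pvStepA m v
  rw [hself, hstep]
  simp

-- ===== VERDICT (by name: the statement is the Claim_ definition above) =====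
theorem computeMaxWordLength1_spec : Claim_equal_computeMaxWordLength1 := by
  intro text _ hpre
  unfold Pre_computeMaxWordLength1 at hpre
  unfold Spec_computeMaxWordLength1 computeMaxWordLength1 computeMaxWordLength1_alt
  cases hws : PySem.Str.split₀ text with
  | nil => exact absurd hws hpre
  | cons w ws => exact pvMain w ws
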